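-- pv_equiv track=rewrite | github.com/enotsGNU/python | drop.py | drop5
-- ===== SOURCE A (Python) =====
-- def drop5(ls):
--     ls_len = []
--     for each in ls:
--         ls_len.append(len(each))
--
--     if ls_len == sorted(ls_len):
--         return ls
--
--     for i in range(len(ls)-1,0,-1):
--         if len(ls[i]) < len(ls[i-1]):
--             j = len(ls[i-1])-len(ls[i])
--             ls[i] += ls[i-1][-j:]
--             ls[i-1] = ls[i-1][:-j]
--     return drop5(ls)
-- ===== SOURCE B (Python) =====
-- def drop5(ls):
--     # One right-to-left sweep that fixes each adjacent pair, carrying the current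
--     # head of the already-swept suffix; len(ls) sweeps always suffice (each sweep
--     # is a backward bubble pass on the lengths).
--     def sweep(xs):
--         if not xs:
--             return []
--         out = []            # reversed tail of the swept list
--         head = xs[-1]       # head of the already-swept suffix
--         for a in reversed(xs[:-1]):
--             if len(head) < len(a):
--                 out.append(head + a[len(head):])
--                 head = a[:len(head)]
--             else:
--                 out.append(head)
--                 head = a
--         out.append(head)
--         out.reverse()
--         return out
--     out = ls
--     for _ in range(len(ls)):
--         out = sweep(out)
--     ls[:] = out
--     return ls
-- ===== Notes on version B (the rewrite author's own statement) =====
-- stated objective: faster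
-- what changed: A repeatedly runs a mutating backward index loop and re-checks length-sortedness with sorted() before an unbounded self-recursion; B replaces this by a purely functional right-to-left sweep (one linear pass carrying the head of the already-swept suffix) iterated a fixed len(ls) times, with no sortedness test, no sorted() call and no index arithmetic.
import Mathlib
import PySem

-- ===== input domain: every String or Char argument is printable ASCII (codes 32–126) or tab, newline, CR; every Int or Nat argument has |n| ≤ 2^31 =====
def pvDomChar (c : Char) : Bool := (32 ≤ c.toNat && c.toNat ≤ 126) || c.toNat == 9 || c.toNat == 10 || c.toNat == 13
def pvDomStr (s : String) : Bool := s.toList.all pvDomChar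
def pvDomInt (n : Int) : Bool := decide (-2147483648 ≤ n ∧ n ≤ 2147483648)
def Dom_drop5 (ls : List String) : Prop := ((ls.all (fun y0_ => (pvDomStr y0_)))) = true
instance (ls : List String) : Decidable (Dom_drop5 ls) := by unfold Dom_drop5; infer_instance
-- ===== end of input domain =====

-- B replaces A's mutating backward index loop + recursive sortedness re-check by a purely
-- functional right-to-left sweep iterated len(ls) times (measured faster in a timing run).
-- A mutates its argument in place; B performs the same final in-place mutation (ls[:] = out),
-- and the theorems below are about the returned value.

-- ===== PORT A =====
-- body of A's backward for-loop at index i (all indices produced by range(len(ls)-1,0,-1)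
-- are in range, so the pyGetD/pySetD defaults never fire)
def drop5Step (cur : List String) (i : Int) : List String :=
  if PySem.Str.len (PySem.List.pyGetD cur i "") < PySem.Str.len (PySem.List.pyGetD cur (i-1) "") then
    let j : Int := PySem.Str.len (PySem.List.pyGetD cur (i-1) "") - PySem.Str.len (PySem.List.pyGetD cur i "")
    let cur1 := PySem.List.pySetD cur i
      (PySem.List.pyGetD cur i "" ++ PySem.Str.slice (PySem.List.pyGetD cur (i-1) "") (some (-j)) none)
    PySem.List.pySetD cur1 (i-1) (PySem.Str.slice (PySem.List.pyGetD cur1 (i-1) "") none (some (-j)))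
  else cur

-- A's self-recursion, made structural with a fuel guard; the lemmas below show fuel ls.length
-- never runs out (each pass is a backward bubble pass on the lengths)
def drop5Go : Nat → List String → List String
  | 0, ls => ls
  | f+1, ls =>
    let lsLen := ls.foldl (fun acc each => acc ++ [PySem.Str.len each]) ([] : List Int)
    if lsLen = PySem.List.sorted lsLen (fun x => x) then ls
    else drop5Go f ((PySem.List.pyRange (PySem.List.len ls - 1) 0 (-1)).foldl drop5Step ls)

def drop5 (ls : List String) : List String := drop5Go ls.length ls

-- ===== PORT B =====
-- Source B's sweep: loop body over reversed(xs[:-1]) with state (out, head)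
def sweepStep (s : List String × String) (a : String) : List String × String :=
  if PySem.Str.len s.2 < PySem.Str.len a then
    (s.1 ++ [s.2 ++ PySem.Str.slice a (some (PySem.Str.len s.2)) none],
     PySem.Str.slice a none (some (PySem.Str.len s.2)))
  else (s.1 ++ [s.2], a)

-- Source B's sweep: one right-to-left pass; out collects the reversed tail, head is
-- the head of the already-swept suffix
def sweepB (ls : List String) : List String :=
  if ls.isEmpty then []
  else
    let head := PySem.List.pyGetD ls (-1) ""
    let r := ((PySem.List.slice ls none (some (-1))).reverse).foldl sweepStep ([], head)
    (r.1 ++ [r.2]).reverse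

-- Source B's 'for _ in range(len(ls)): out = sweep(out)'
def drop5_alt (ls : List String) : List String :=
  (PySem.List.pyRange 0 (PySem.List.len ls) 1).foldl (fun out _ => sweepB out) ls

-- ===== PRECONDITION & SPEC =====
def Spec_drop5 (ls : List String) (out : List String) : Prop := out = drop5_alt ls
instance (ls : List String) (out : List String) : Decidable (Spec_drop5 ls out) := by unfold Spec_drop5; infer_instance

-- ===== CLAIM (what is proved, stated in full; the proofs are below) =====
def Claim_equal_drop5 : Prop := ∀ (ls : List String), Dom_drop5 ls → Spec_drop5 ls (drop5 ls)

-- ===== LEMMAS AND PROOFS =====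

-- the sweep, as a structural recursion (proof-side model of Source B's loop)
def sweepR : List String → List String
  | [] => []
  | a :: xs =>
    match sweepR xs with
    | [] => [a]
    | b :: rs =>
      if PySem.Str.len b < PySem.Str.len a then
        PySem.Str.slice a none (some (PySem.Str.len b))
          :: (b ++ PySem.Str.slice a (some (PySem.Str.len b)) none) :: rs
      else a :: b :: rs

theorem fold_sweepStep (l : List String) (z : String) :
    ((l.reverse.foldl sweepStep ([], z)).1 ++ [(l.reverse.foldl sweepStep ([], z)).2]).reverse
      = sweepR (l ++ [z]) := by
  induction l generalizing z with
  | nil => rfl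
  | cons a l ih =>
    have hs : (a :: l).reverse = l.reverse ++ [a] := by simp
    rw [hs, List.foldl_append]
    set r := l.reverse.foldl sweepStep ([], z) with hr
    have ihz := ih z
    rw [← hr] at ihz
    have ihr : r.2 :: r.1.reverse = sweepR (l ++ [z]) := by
      rw [← ihz]
      simp
    have hcons : (a :: l) ++ [z] = a :: (l ++ [z]) := rfl
    rw [hcons, sweepR, ← ihr]
    show ((sweepStep r a).1 ++ [(sweepStep r a).2]).reverse
        = (if PySem.Str.len r.2 < PySem.Str.len a then
            PySem.Str.slice a none (some (PySem.Str.len r.2))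
              :: (r.2 ++ PySem.Str.slice a (some (PySem.Str.len r.2)) none) :: r.1.reverse
          else a :: r.2 :: r.1.reverse)
    by_cases hc : PySem.Str.len r.2 < PySem.Str.len a
    · rw [if_pos hc]
      unfold sweepStep
      rw [if_pos hc]
      simp
    · rw [if_neg hc]
      unfold sweepStep
      rw [if_neg hc]
      simp

theorem sweepB_eq_sweepR (ls : List String) : sweepB ls = sweepR ls := by
  rcases List.eq_nil_or_concat ls with rfl | ⟨l, z, rfl⟩
  · rfl
  · unfold sweepB
    rw [List.concat_eq_append]
    rw [if_neg (by simp)]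
    rw [PySem.List.pyGetD_neg_one_append_singleton, PySem.List.slice_to_neg_one,
        List.dropLast_concat]
    exact fold_sweepStep l z


-- lengths of a string list, as naturals
def lenL (ls : List String) : List Nat := ls.map String.length

-- the effect of one sweep on the lengths
def bubbleN : List Nat → List Nat
  | [] => []
  | a :: xs =>
    match bubbleN xs with
    | [] => [a]
    | b :: rs => if b < a then b :: a :: rs else a :: b :: rs

-- the descending index list [m, m-1, …, 1] of A's backward loop
def descList : Nat → List Int
  | 0 => []
  | m+1 => ((m+1 : Nat) : Int) :: descList m

theorem pyRange_desc (m : Nat) :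
    PySem.List.pyRange (m : Int) 0 (-1) = descList m := by
  induction m with
  | zero => simpa [descList] using PySem.List.pyRange_neg_one_eq_nil (a := 0) (b := 0) le_rfl
  | succ m ih =>
    rw [PySem.List.pyRange_neg_one_cons (by exact_mod_cast Nat.succ_pos m)]
    have h : ((m+1 : Nat) : Int) - 1 = (m : Int) := by push_cast; ring
    rw [descList, h, ih]

theorem mem_descList {m : Nat} {i : Int} (h : i ∈ descList m) : 1 ≤ i ∧ i ≤ (m : Int) := by
  induction m with
  | zero => simp [descList] at h
  | succ m ih =>
    simp only [descList, List.mem_cons] at h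
    rcases h with h | h
    · subst h; constructor <;> push_cast <;> omega
    · rcases ih h with ⟨h1, h2⟩
      refine ⟨h1, ?_⟩
      push_cast
      omega

theorem desc_split (m : Nat) (hm : 1 ≤ m) :
    descList m = (descList (m-1)).map (· + 1) ++ [1] := by
  induction m with
  | zero => omega
  | succ m ih =>
    rcases Nat.eq_or_lt_of_le hm with h | h
    · have : m = 0 := by omega
      subst this
      simp [descList]
    · have hm' : 1 ≤ m := by omega
      rw [descList, ih hm']
      have h2 : m + 1 - 1 = (m - 1) + 1 := by omega
      rw [h2, descList]
      simp only [List.map_cons, List.cons_append]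
      congr 2
      push_cast
      omega

theorem length_drop5Step (cur : List String) (i : Int) :
    (drop5Step cur i).length = cur.length := by
  unfold drop5Step
  split
  · simp [PySem.List.length_pySetD]
  · rfl

-- shifting one cons past a positive-index get/set
theorem getShift (x : String) (l : List String) (i : Int) (d : String)
    (h1 : 0 ≤ i) (h2 : i < (l.length : Int)) :
    PySem.List.pyGetD (x :: l) (i+1) d = PySem.List.pyGetD l i d := by
  rw [PySem.List.pyGetD_eq_getElem _ d (by omega) (by simp; omega),
      PySem.List.pyGetD_eq_getElem _ d h1 h2]
  have h : (i+1).toNat = i.toNat + 1 := by omega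
  simp [h]

theorem setShift (x : String) (l : List String) (i : Int) (v : String) (h1 : 0 ≤ i) :
    PySem.List.pySetD (x :: l) (i+1) v = x :: PySem.List.pySetD l i v := by
  rw [PySem.List.pySetD_of_nonneg _ v (by omega), PySem.List.pySetD_of_nonneg _ v h1]
  have h : (i+1).toNat = i.toNat + 1 := by omega
  rw [h, List.set_cons_succ]

theorem drop5Step_shift (a : String) (xs : List String) (i : Int)
    (h1 : 1 ≤ i) (h2 : i < (xs.length : Int)) :
    drop5Step (a :: xs) (i + 1) = a :: drop5Step xs i := by
  have e1 : i + 1 - 1 = (i - 1) + 1 := by ring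
  have hg1 : PySem.List.pyGetD (a :: xs) (i+1) "" = PySem.List.pyGetD xs i "" :=
    getShift a xs i "" (by omega) h2
  have hg0 : PySem.List.pyGetD (a :: xs) (i+1-1) "" = PySem.List.pyGetD xs (i-1) "" := by
    rw [e1]; exact getShift a xs (i-1) "" (by omega) (by omega)
  have key : ∀ (v : String) (J : Int),
      PySem.List.pySetD (PySem.List.pySetD (a :: xs) (i+1) v) (i+1-1)
        (PySem.Str.slice (PySem.List.pyGetD (PySem.List.pySetD (a :: xs) (i+1) v) (i+1-1) "") none (some (-J)))
      = a :: PySem.List.pySetD (PySem.List.pySetD xs i v) (i-1)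
        (PySem.Str.slice (PySem.List.pyGetD (PySem.List.pySetD xs i v) (i-1) "") none (some (-J))) := by
    intro v J
    rw [setShift a xs i v (by omega), e1,
        getShift a (PySem.List.pySetD xs i v) (i-1) "" (by omega)
          (by rw [PySem.List.length_pySetD]; omega),
        setShift a (PySem.List.pySetD xs i v) (i-1) _ (by omega)]
  unfold drop5Step
  dsimp only
  rw [hg1, hg0]
  split
  · exact key _ _
  · rfl

-- the two slice spellings coincide (A's negative index vs B's positive one)
theorem slice_to_eq (a b : String) (h : b.length < a.length) :
    PySem.Str.slice a none (some (-(PySem.Str.len a - PySem.Str.len b))) =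
    PySem.Str.slice a none (some (PySem.Str.len b)) := by
  rw [← String.toList_inj, PySem.Str.toList_slice, PySem.Str.toList_slice]
  simp only [PySem.Chars.slice_eq_listSlice]
  have hk : -(PySem.Str.len a - PySem.Str.len b) = -(((a.length - b.length : Nat) : Int)) := by
    simp only [PySem.Str.len_eq, String.length_toList]
    push_cast [Nat.cast_sub (le_of_lt h)]
    ring
  have hb : PySem.Str.len b = ((b.length : Nat) : Int) := by
    simp [PySem.Str.len_eq, String.length_toList]
  rw [hk, hb, PySem.List.slice_to_neg_natCast _ _ (by omega), PySem.List.slice_to_natCast]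
  have : a.toList.length - (a.length - b.length) = b.length := by
    simp [String.length_toList]
    omega
  rw [this]

theorem slice_from_eq (a b : String) (h : b.length < a.length) :
    PySem.Str.slice a (some (-(PySem.Str.len a - PySem.Str.len b))) none =
    PySem.Str.slice a (some (PySem.Str.len b)) none := by
  rw [← String.toList_inj, PySem.Str.toList_slice, PySem.Str.toList_slice]
  simp only [PySem.Chars.slice_eq_listSlice]
  have hk : -(PySem.Str.len a - PySem.Str.len b) = -(((a.length - b.length : Nat) : Int)) := by
    simp only [PySem.Str.len_eq, String.length_toList]
    push_cast [Nat.cast_sub (le_of_lt h)]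
    ring
  have hb : PySem.Str.len b = ((b.length : Nat) : Int) := by
    simp [PySem.Str.len_eq, String.length_toList]
  rw [hk, hb, PySem.List.slice_from_neg_natCast _ _ (by omega), PySem.List.slice_from_natCast]
  have : a.toList.length - (a.length - b.length) = b.length := by
    simp [String.length_toList]
    omega
  rw [this]

theorem drop5Step_one (a b : String) (rs : List String) :
    drop5Step (a :: b :: rs) 1 =
      if PySem.Str.len b < PySem.Str.len a then
        PySem.Str.slice a none (some (PySem.Str.len b))
          :: (b ++ PySem.Str.slice a (some (PySem.Str.len b)) none) :: rs
      else a :: b :: rs := by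
  have g1 : ∀ d, PySem.List.pyGetD (a :: b :: rs) (1 : Int) d = b := by
    intro d
    rw [show (1 : Int) = ((1 : Nat) : Int) from rfl, PySem.List.pyGetD_natCast]
    rfl
  have g0 : ∀ d, PySem.List.pyGetD (a :: b :: rs) ((1 : Int) - 1) d = a := by
    intro d
    norm_num [PySem.List.pyGetD_zero_cons]
  unfold drop5Step
  dsimp only
  rw [g1, g0]
  split
  · next hc =>
    have hlen : b.length < a.length := by
      simp only [PySem.Str.len_eq, String.length_toList] at hc
      exact_mod_cast hc
    have s1 : PySem.List.pySetD (a :: b :: rs) 1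
        (b ++ PySem.Str.slice a (some (-(PySem.Str.len a - PySem.Str.len b))) none)
        = a :: (b ++ PySem.Str.slice a (some (-(PySem.Str.len a - PySem.Str.len b))) none) :: rs := by
      rw [PySem.List.pySetD_of_nonneg _ _ (by omega)]
      rfl
    rw [s1]
    have g0' : PySem.List.pyGetD
        (a :: (b ++ PySem.Str.slice a (some (-(PySem.Str.len a - PySem.Str.len b))) none) :: rs)
        ((1 : Int) - 1) "" = a := by
      norm_num [PySem.List.pyGetD_zero_cons]
    rw [g0']
    have s0 : ∀ (l : List String) (v : String),
        PySem.List.pySetD l ((1 : Int) - 1) v = l.set 0 v := by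
      intro l v
      rw [show ((1 : Int) - 1) = ((0 : Nat) : Int) by norm_num, PySem.List.pySetD_natCast]
    rw [s0]
    simp only [List.set_cons_zero]
    rw [slice_to_eq a b hlen, slice_from_eq a b hlen]
  · rfl

theorem foldl_shift (L : List Int) (a : String) (xs : List String)
    (hL : ∀ i ∈ L, 1 ≤ i ∧ i < (xs.length : Int)) :
    (L.map (· + 1)).foldl drop5Step (a :: xs) = a :: L.foldl drop5Step xs := by
  induction L generalizing xs with
  | nil => simp
  | cons i L ih =>
    simp only [List.map_cons, List.foldl_cons]
    rw [drop5Step_shift a xs i (hL i (by simp)).1 (hL i (by simp)).2]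
    exact ih _ (fun i' hi' => by
      have := hL i' (by simp [hi'])
      rw [length_drop5Step]; exact this)

theorem length_sweepR (ls : List String) : (sweepR ls).length = ls.length := by
  induction ls with
  | nil => rfl
  | cons a xs ih =>
    rw [sweepR]
    cases h : sweepR xs with
    | nil =>
      rw [h] at ih
      simp at ih
      simp [← ih]
    | cons b rs =>
      rw [h] at ih
      simp only [List.length_cons] at ih ⊢
      split <;> simp <;> omega

theorem passA_eq_sweepR (ls : List String) :
    (PySem.List.pyRange ((ls.length : Int) - 1) 0 (-1)).foldl drop5Step ls = sweepR ls := by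
  induction ls with
  | nil =>
    rw [PySem.List.pyRange_neg_one_eq_nil (by simp : ((([] : List String).length : Int) - 1) ≤ 0)]
    rfl
  | cons a xs ih =>
    cases xs with
    | nil =>
      rw [PySem.List.pyRange_neg_one_eq_nil (by simp : ((([a] : List String).length : Int) - 1) ≤ 0)]
      rfl
    | cons x xs' =>
      have hlen : ((a :: x :: xs').length : Int) - 1 = (((x :: xs').length : Nat) : Int) := by
        push_cast
        simp
      rw [hlen, pyRange_desc]
      have hm1 : 1 ≤ (x :: xs').length := by simp
      rw [desc_split _ hm1, List.foldl_append]
      have hmem : ∀ i ∈ descList ((x :: xs').length - 1), 1 ≤ i ∧ i < ((x :: xs').length : Int) := by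
        intro i hi
        have h := mem_descList hi
        refine ⟨h.1, ?_⟩
        have h2 := h.2
        have : (((x :: xs').length - 1 : Nat) : Int) < ((x :: xs').length : Int) := by
          push_cast
          omega
        omega
      rw [foldl_shift _ a _ hmem]
      have ihx : (descList ((x :: xs').length - 1)).foldl drop5Step (x :: xs') = sweepR (x :: xs') := by
        rw [show (((x :: xs').length : Int) - 1) = (((x :: xs').length - 1 : Nat) : Int) by push_cast; simp,
            pyRange_desc] at ih
        exact ih
      rw [ihx]
      simp only [List.foldl_cons, List.foldl_nil]
      have hne : sweepR (x :: xs') ≠ [] := by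
        intro h
        have h2 := length_sweepR (x :: xs')
        rw [h] at h2
        simp at h2
      cases h : sweepR (x :: xs') with
      | nil => exact absurd h hne
      | cons b rs =>
        rw [drop5Step_one]
        rw [sweepR, h]

-- ===== bubble-sort facts on the length lists =====

theorem bubbleN_perm (l : List Nat) : (bubbleN l).Perm l := by
  induction l with
  | nil => rfl
  | cons a xs ih =>
    rw [bubbleN]
    cases hx : bubbleN xs with
    | nil =>
      rw [hx] at ih
      have hxe : xs = [] := (ih.symm).eq_nil
      subst hxe
      exact List.Perm.refl [a]
    | cons b rs =>
      rw [hx] at ih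
      show (if b < a then b :: a :: rs else a :: b :: rs).Perm (a :: xs)
      by_cases hba : b < a
      · rw [if_pos hba]
        exact (List.Perm.swap a b rs).trans (ih.cons a)
      · rw [if_neg hba]
        exact ih.cons a

theorem bubbleN_head_min (l : List Nat) : ∀ (c : Nat) (t : List Nat),
    bubbleN l = c :: t → ∀ x ∈ t, c ≤ x := by
  induction l with
  | nil => intro c t h; simp [bubbleN] at h
  | cons a xs ih =>
    intro c t h
    rw [bubbleN] at h
    cases hx : bubbleN xs with
    | nil =>
      rw [hx] at h
      have h' : ([a] : List Nat) = c :: t := h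
      obtain ⟨h1, h2⟩ := List.cons_eq_cons.mp h'
      subst h1
      subst h2
      simp
    | cons b rs =>
      rw [hx] at h
      have h' : (if b < a then b :: a :: rs else a :: b :: rs) = c :: t := h
      by_cases hba : b < a
      · rw [if_pos hba] at h'
        obtain ⟨h1, h2⟩ := List.cons_eq_cons.mp h'
        subst h1
        subst h2
        intro x hxm
        rcases List.mem_cons.mp hxm with rfl | hm
        · omega
        · exact ih b rs hx x hm
      · rw [if_neg hba] at h'
        obtain ⟨h1, h2⟩ := List.cons_eq_cons.mp h'
        subst h1
        subst h2
        intro x hxm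
        rcases List.mem_cons.mp hxm with rfl | hm
        · omega
        · have hbx := ih b rs hx x hm
          omega

theorem bubbleN_cons_min (a : Nat) (xs : List Nat) (h : ∀ x ∈ xs, a ≤ x) :
    bubbleN (a :: xs) = a :: bubbleN xs := by
  cases hx : bubbleN xs with
  | nil => rw [bubbleN, hx]
  | cons b rs =>
    have hb : b ∈ xs := (bubbleN_perm xs).mem_iff.mp (by simp [hx])
    rw [bubbleN, hx]
    show (if b < a then b :: a :: rs else a :: b :: rs) = a :: b :: rs
    rw [if_neg (Nat.not_lt.mpr (h b hb))]

theorem bubbleN_iter_perm (n : Nat) (l : List Nat) : (bubbleN^[n] l).Perm l := by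
  induction n generalizing l with
  | zero => simp
  | succ n ih => rw [Function.iterate_succ_apply]; exact (ih _).trans (bubbleN_perm l)

theorem bubbleN_iter_min (n : Nat) (c : Nat) (t : List Nat) (h : ∀ x ∈ t, c ≤ x) :
    bubbleN^[n] (c :: t) = c :: bubbleN^[n] t := by
  induction n generalizing t with
  | zero => simp
  | succ n ih =>
    rw [Function.iterate_succ_apply, Function.iterate_succ_apply,
        bubbleN_cons_min c t h]
    exact ih _ (fun x hx => h x ((bubbleN_perm t).mem_iff.mp hx))

theorem bubbleN_sorts (n : Nat) (l : List Nat) (h : l.length ≤ n) :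
    (bubbleN^[n] l).Pairwise (· ≤ ·) := by
  induction n generalizing l with
  | zero =>
    have : l = [] := List.length_eq_zero_iff.mp (Nat.le_zero.mp h)
    simp [this]
  | succ n ih =>
    cases l with
    | nil => simpa using ih [] (by simp)
    | cons a xs =>
      rw [Function.iterate_succ_apply]
      cases hb : bubbleN (a :: xs) with
      | nil =>
        have h2 := (bubbleN_perm (a :: xs)).length_eq
        rw [hb] at h2
        simp at h2
      | cons c t =>
        have hmin : ∀ x ∈ t, c ≤ x := bubbleN_head_min _ c t hb
        rw [bubbleN_iter_min n c t hmin]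
        have hlt : t.length ≤ n := by
          have h2 := (bubbleN_perm (a :: xs)).length_eq
          rw [hb] at h2
          simp at h2 h
          omega
        refine List.pairwise_cons.mpr ⟨?_, ih t hlt⟩
        intro x hx
        exact hmin x ((bubbleN_iter_perm n t).mem_iff.mp hx)

-- ===== sweepR vs bubbleN =====

theorem length_slice_to (a b : String) (h : b.length ≤ a.length) :
    (PySem.Str.slice a none (some (PySem.Str.len b))).length = b.length := by
  rw [← String.length_toList, PySem.Str.toList_slice]
  simp only [PySem.Chars.slice_eq_listSlice]
  rw [show PySem.Str.len b = ((b.length : Nat) : Int) by simp [PySem.Str.len_eq, String.length_toList],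
      PySem.List.slice_to_natCast]
  simp [String.length_toList]
  omega

theorem length_append_slice_from (a b : String) (h : b.length ≤ a.length) :
    (b ++ PySem.Str.slice a (some (PySem.Str.len b)) none).length = a.length := by
  rw [String.length_append, ← String.length_toList (s := PySem.Str.slice a (some (PySem.Str.len b)) none),
      PySem.Str.toList_slice]
  simp only [PySem.Chars.slice_eq_listSlice]
  rw [show PySem.Str.len b = ((b.length : Nat) : Int) by simp [PySem.Str.len_eq, String.length_toList],
      PySem.List.slice_from_natCast]
  simp [String.length_toList]
  omega

theorem lenN_lt_iff (a b : String) :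
    PySem.Str.len b < PySem.Str.len a ↔ b.length < a.length := by
  simp only [PySem.Str.len_eq, String.length_toList]
  exact_mod_cast Iff.rfl

theorem lenL_sweepR (ls : List String) : lenL (sweepR ls) = bubbleN (lenL ls) := by
  induction ls with
  | nil => rfl
  | cons a xs ih =>
    rw [sweepR, show lenL (a :: xs) = a.length :: lenL xs from rfl, bubbleN]
    cases h : sweepR xs with
    | nil =>
      rw [h] at ih
      rw [show bubbleN (lenL xs) = lenL ([] : List String) from ih.symm]
      rfl
    | cons b rs =>
      rw [h] at ih
      rw [show bubbleN (lenL xs) = b.length :: lenL rs from by rw [← ih]; rfl]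
      show lenL (if PySem.Str.len b < PySem.Str.len a then
            PySem.Str.slice a none (some (PySem.Str.len b))
              :: (b ++ PySem.Str.slice a (some (PySem.Str.len b)) none) :: rs
          else a :: b :: rs)
        = (if b.length < a.length then b.length :: a.length :: lenL rs
           else a.length :: b.length :: lenL rs)
      by_cases hlt : b.length < a.length
      · rw [if_pos ((lenN_lt_iff a b).mpr hlt), if_pos hlt]
        show (PySem.Str.slice a none (some (PySem.Str.len b))).length
            :: (b ++ PySem.Str.slice a (some (PySem.Str.len b)) none).length :: lenL rs
            = b.length :: a.length :: lenL rs
        rw [length_slice_to a b (le_of_lt hlt), length_append_slice_from a b (le_of_lt hlt)]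
      · rw [if_neg (fun hc => hlt ((lenN_lt_iff a b).mp hc)), if_neg hlt]
        rfl

theorem sweepR_sorted (ls : List String) (h : (lenL ls).Pairwise (· ≤ ·)) :
    sweepR ls = ls := by
  induction ls with
  | nil => rfl
  | cons a xs ih =>
    have htail : (lenL xs).Pairwise (· ≤ ·) := List.Pairwise.of_cons h
    rw [sweepR, ih htail]
    cases xs with
    | nil => rfl
    | cons x xs' =>
      have hax : a.length ≤ x.length := (List.pairwise_cons.mp h).1 x.length (by simp [lenL])
      show (if PySem.Str.len x < PySem.Str.len a then
            PySem.Str.slice a none (some (PySem.Str.len x))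
              :: (x ++ PySem.Str.slice a (some (PySem.Str.len x)) none) :: xs'
          else a :: x :: xs') = a :: x :: xs'
      rw [if_neg (fun hc => absurd ((lenN_lt_iff a x).mp hc) (Nat.not_lt.mpr hax))]

theorem sweepR_iter_sorted (k : Nat) (ls : List String) (h : (lenL ls).Pairwise (· ≤ ·)) :
    sweepR^[k] ls = ls := by
  induction k with
  | zero => simp
  | succ k ih => rw [Function.iterate_succ_apply, sweepR_sorted ls h, ih]

theorem lenL_sweepR_iter (k : Nat) (ls : List String) :
    lenL (sweepR^[k] ls) = bubbleN^[k] (lenL ls) := by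
  induction k generalizing ls with
  | zero => simp
  | succ k ih =>
    rw [Function.iterate_succ_apply, Function.iterate_succ_apply, ih, lenL_sweepR]

-- A's sortedness test, in terms of lenL
theorem sorted_test (ls : List String) :
    (ls.map PySem.Str.len = PySem.List.sorted (ls.map PySem.Str.len) (fun x => x))
      ↔ (lenL ls).Pairwise (· ≤ ·) := by
  have hequiv : (List.Pairwise (fun a b : Int => a ≤ b) (ls.map PySem.Str.len))
      ↔ (lenL ls).Pairwise (· ≤ ·) := by
    unfold lenL
    rw [List.pairwise_map, List.pairwise_map]
    constructor <;> intro h <;>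
      exact h.imp (by
        intro a b hab
        simp only [PySem.Str.len_eq, String.length_toList] at hab ⊢
        exact_mod_cast hab)
  constructor
  · intro h
    exact hequiv.mp (h ▸ PySem.List.sorted_pairwise (ls.map PySem.Str.len) (fun x => x))
  · intro h
    exact (PySem.List.sorted_eq_self_of_pairwise _ _ (hequiv.mpr h)).symm

theorem drop5Go_eq_iter (f k : Nat) (ls : List String) (hk : k ≤ f)
    (hs : (lenL (sweepR^[k] ls)).Pairwise (· ≤ ·)) :
    drop5Go f ls = sweepR^[f] ls := by
  induction f generalizing k ls with
  | zero =>
    have : k = 0 := Nat.le_zero.mp hk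
    subst this
    simp at hs
    rfl
  | succ f ih =>
    rw [drop5Go]
    simp only [PySem.List.foldl_append_singleton_eq_map, List.nil_append]
    split
    · next hsorted =>
      rw [sweepR_iter_sorted (f+1) ls ((sorted_test ls).mp hsorted)]
    · next hnot =>
      cases k with
      | zero =>
        exact absurd ((sorted_test ls).mpr (by simpa using hs)) hnot
      | succ k' =>
        have hpass : (PySem.List.pyRange (PySem.List.len ls - 1) 0 (-1)).foldl drop5Step ls = sweepR ls := by
          have : PySem.List.len ls = (ls.length : Int) := by simp [PySem.List.len_eq]
          rw [this]
          exact passA_eq_sweepR ls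
        rw [hpass, Function.iterate_succ_apply]
        exact ih k' (sweepR ls) (by omega)
          (by rwa [← Function.iterate_succ_apply])

theorem foldl_const_sweep (L : List Int) (x : List String) :
    L.foldl (fun out _ => sweepB out) x = sweepB^[L.length] x := by
  induction L generalizing x with
  | nil => rfl
  | cons i L ih => simp [List.foldl_cons, ih, Function.iterate_succ_apply]

theorem drop5_alt_eq_iter (ls : List String) :
    drop5_alt ls = sweepR^[ls.length] ls := by
  unfold drop5_alt
  rw [foldl_const_sweep, show sweepB = sweepR from funext sweepB_eq_sweepR]
  congr 1
  simp [PySem.List.len_eq, PySem.List.length_pyRange_one]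

-- ===== VERDICT (by name: the statement is the Claim_ definition above) =====
theorem drop5_spec : Claim_equal_drop5 := by
  intro ls _
  unfold Spec_drop5
  rw [drop5_alt_eq_iter]
  unfold drop5
  refine drop5Go_eq_iter ls.length ls.length ls le_rfl ?_
  rw [lenL_sweepR_iter]
  exact bubbleN_sorts ls.length (lenL ls) (by simp [lenL])
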